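-- pv_equiv track=rewrite | github.com/mariosstm/Algorithms-Data-Structures | Παραδοτέο(2)_Algorithms_&_DataStructures/Source_Codes/Sparse_Technology_(2).py | create_ATA_array
-- ===== SOURCE A (Python) =====
-- def create_ATA_array(a_jloc,a_irow):
--     c=0
--     b_jloc,b_iloc,b_jval,at=[],[0],[],[]
--     a_jloc.append(0)
--     for i in range (len(a_jloc)-1):         #n
--         at=a_irow [a_jloc[i]:a_jloc[i+1]]
--         for k in range(i,len(a_jloc)-1):    #n*n=n^2
--
--             for q in at:
--                 if a_irow[a_jloc[k]:a_jloc[k+1]].count(q)!=0: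
--                     c+=1
--
--             if c!=0:
--                 b_jloc.append(k)
--                 b_jval.append(c)
--                 c=0
--         b_iloc.append(len(b_jloc))
--     b_iloc.pop()
--
--     return b_iloc,b_jloc,b_jval
-- ===== SOURCE B (Python) =====
-- def create_ATA_array(a_jloc, a_irow):
--     # Same mutation as A: append sentinel 0 to a_jloc (caller-observable).
--     a_jloc.append(0)
--     n = len(a_jloc) - 1
--     # One pass per column: multiplicity counter + list of distinct values
--     # (first-occurrence order).  The inner per-entry scans of A disappear:
--     # cnt(i,k) = sum over distinct values v of column k of counter_i[v].
--     counters = []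
--     distinct = []
--     for j in range(n):
--         cnt = {}
--         for v in a_irow[a_jloc[j]:a_jloc[j+1]]:
--             cnt[v] = cnt.get(v, 0) + 1
--         counters.append(cnt)
--         distinct.append(list(cnt))
--     b_jloc, b_iloc, b_jval = [], [0], []
--     for i in range(n):
--         ci = counters[i]
--         for k in range(i, n):
--             c = sum(ci.get(v, 0) for v in distinct[k])
--             if c != 0:
--                 b_jloc.append(k)
--                 b_jval.append(c)
--         b_iloc.append(len(b_jloc))
--     b_iloc.pop()
--     return b_iloc, b_jloc, b_jval
-- ===== Notes on version B (the rewrite author's own statement) =====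
-- stated objective: faster
-- what changed: Instead of re-slicing column k and scanning it with list.count for every entry q of every pair (i,k), B builds each column's multiplicity counter and distinct-value list once and computes each pair's count as a sum of counter lookups over column k's distinct values.
import Mathlib
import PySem

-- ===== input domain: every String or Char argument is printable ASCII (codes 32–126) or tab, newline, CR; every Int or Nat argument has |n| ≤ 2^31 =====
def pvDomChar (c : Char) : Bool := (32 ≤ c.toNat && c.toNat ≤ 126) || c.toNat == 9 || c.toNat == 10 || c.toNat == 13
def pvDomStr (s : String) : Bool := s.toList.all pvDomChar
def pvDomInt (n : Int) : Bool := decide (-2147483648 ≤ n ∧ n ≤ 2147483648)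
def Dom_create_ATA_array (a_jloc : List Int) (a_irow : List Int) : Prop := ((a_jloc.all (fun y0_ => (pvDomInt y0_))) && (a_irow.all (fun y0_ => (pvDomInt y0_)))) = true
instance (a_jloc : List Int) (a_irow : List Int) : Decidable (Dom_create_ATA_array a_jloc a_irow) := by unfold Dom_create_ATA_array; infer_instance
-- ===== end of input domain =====

-- B replaces A's per-pair slice-and-count scans by per-column counters and
-- distinct-value lists built once (faster).  Both Pythons mutate a_jloc
-- (append 0); the equivalence proved here is about the return value only
-- (B performs the same mutation).

-- ===== PORT A =====
def create_ATA_array (a_jloc : List Int) (a_irow : List Int) : List Int × List Int × List Int :=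
  -- a_jloc.append(0)
  let aj := a_jloc ++ [0]
  let nn : Int := (aj.length : Int) - 1
  -- loop state (c, b_jloc, b_iloc, b_jval); at_ recomputed per i as in A
  let st := (PySem.List.pyRange 0 nn 1).foldl
    (fun (st : Int × List Int × List Int × List Int) i =>
      let at_ := PySem.List.slice a_irow (some (PySem.List.pyGetD aj i 0)) (some (PySem.List.pyGetD aj (i+1) 0))
      let st2 := (PySem.List.pyRange i nn 1).foldl
        (fun (s : Int × List Int × List Int) k =>
          let c := at_.foldl (fun c q =>
            if PySem.List.count (PySem.List.slice a_irow (some (PySem.List.pyGetD aj k 0)) (some (PySem.List.pyGetD aj (k+1) 0))) q ≠ 0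
            then c + 1 else c) s.1
          if c ≠ 0 then (0, s.2.1 ++ [k], s.2.2 ++ [c]) else (c, s.2.1, s.2.2))
        (st.1, st.2.1, st.2.2.2)
      (st2.1, st2.2.1, st.2.2.1 ++ [(st2.2.1.length : Int)], st2.2.2))
    (0, [], [0], [])
  -- b_iloc.pop() drops the last element (the popped value is unused)
  (st.2.2.1.dropLast, st.2.1, st.2.2.2)

-- ===== PORT B =====
def create_ATA_array_alt (a_jloc : List Int) (a_irow : List Int) : List Int × List Int × List Int :=
  let aj := a_jloc ++ [0]
  let nn : Int := (aj.length : Int) - 1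
  -- one pass per column: multiplicity counter + distinct values (first-occurrence order)
  let cd := (PySem.List.pyRange 0 nn 1).foldl
    (fun (acc : List (PySem.Dict Int Int) × List (List Int)) j =>
      let cnt := (PySem.List.slice a_irow (some (PySem.List.pyGetD aj j 0)) (some (PySem.List.pyGetD aj (j+1) 0))).foldl
        (fun d v => d.modify v 0 (· + 1)) PySem.Dict.empty
      (acc.1 ++ [cnt], acc.2 ++ [cnt.keys]))
    ([], [])
  let counters := cd.1
  let distinct := cd.2
  let st := (PySem.List.pyRange 0 nn 1).foldl
    (fun (st : List Int × List Int × List Int) i =>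
      let ci := PySem.List.pyGetD counters i PySem.Dict.empty
      let st2 := (PySem.List.pyRange i nn 1).foldl
        (fun (s : List Int × List Int) k =>
          let c := ((PySem.List.pyGetD distinct k []).map (fun v => ci.getD v 0)).sum
          if c ≠ 0 then (s.1 ++ [k], s.2 ++ [c]) else s)
        (st.1, st.2.2)
      (st2.1, st.2.1 ++ [(st2.1.length : Int)], st2.2))
    ([], [0], [])
  (st.2.1.dropLast, st.1, st.2.2)

-- ===== PRECONDITION & SPEC =====
def Spec_create_ATA_array (a_jloc : List Int) (a_irow : List Int) (out : List Int × List Int × List Int) : Prop := out = create_ATA_array_alt a_jloc a_irow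
instance (a_jloc : List Int) (a_irow : List Int) (out : List Int × List Int × List Int) : Decidable (Spec_create_ATA_array a_jloc a_irow out) := by unfold Spec_create_ATA_array; infer_instance

-- ===== CLAIM (what is proved, stated in full; the proofs are below) =====
def Claim_equal_create_ATA_array : Prop := ∀ (a_jloc : List Int) (a_irow : List Int), Dom_create_ATA_array a_jloc a_irow → Spec_create_ATA_array a_jloc a_irow (create_ATA_array a_jloc a_irow)

-- ===== LEMMAS AND PROOFS =====

-- column j of the (0-appended) CSC structure, as both programs slice it
def colS (a_jloc a_irow : List Int) (j : Int) : List Int :=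
  PySem.List.slice a_irow (some (PySem.List.pyGetD (a_jloc ++ [0]) j 0)) (some (PySem.List.pyGetD (a_jloc ++ [0]) (j+1) 0))

-- A's count for the pair (i, k): entries of column i that occur in column k
def fA (a_jloc a_irow : List Int) (i k : Int) : Int :=
  ((colS a_jloc a_irow i).countP (fun q => decide (¬ PySem.List.count (colS a_jloc a_irow k) q = 0)) : Int)

-- B's count for the pair (i, k): sum over distinct values of column k of their
-- multiplicity in column i
def fB (a_jloc a_irow : List Int) (i k : Int) : Int :=
  ((PySem.Set.ofList (colS a_jloc a_irow k)).map (fun v => ((colS a_jloc a_irow i).count v : Int))).sum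

-- the emission double loop both programs share, abstracted over the pair-count
def build (nn : Int) (f : Int → Int → Int) : List Int × List Int × List Int :=
  let st := (PySem.List.pyRange 0 nn 1).foldl
    (fun (st : List Int × List Int × List Int) i =>
      let st2 := (PySem.List.pyRange i nn 1).foldl
        (fun (s : List Int × List Int) k =>
          if f i k ≠ 0 then (s.1 ++ [k], s.2 ++ [f i k]) else s)
        (st.1, st.2.2)
      (st2.1, st.2.1 ++ [(st2.1.length : Int)], st2.2))
    ([], [0], [])
  (st.2.1.dropLast, st.1, st.2.2)

theorem key_count (xs ys : List Int) :
    ((PySem.Set.ofList ys).map (fun v => (List.count v xs : Int))).sum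
      = (xs.countP (fun q => decide (q ∈ ys)) : Int) := by
  induction xs with
  | nil => simp
  | cons x xs ih =>
      have h1 : ((PySem.Set.ofList ys).map (fun v => (List.count v (x :: xs) : Int))).sum
          = ((PySem.Set.ofList ys).map (fun v => (List.count v xs : Int) + (if v == x then 1 else 0))).sum := by
        apply congrArg; apply List.map_congr_left; intro v _
        rw [List.count_cons]; push_cast
        rw [show ((x == v) = (v == x)) from by simp [eq_comm]]
      rw [h1, PySem.List.sum_map_add_int, ih, PySem.List.sum_map_ite_one_zero]
      have h2 : List.countP (fun v => v == x) (PySem.Set.ofList ys) = if x ∈ ys then 1 else 0 := by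
        have hc : List.countP (fun v => v == x) (PySem.Set.ofList ys) = List.count x (PySem.Set.ofList ys) := by
          rw [List.count]
        rw [hc]
        by_cases hx : x ∈ ys
        · rw [List.count_eq_one_of_mem (PySem.Set.nodup_ofList ys) ((PySem.Set.mem_ofList ys x).mpr hx)]
          simp [hx]
        · rw [List.count_eq_zero_of_not_mem (fun h => hx ((PySem.Set.mem_ofList ys x).mp h))]
          simp [hx]
      rw [List.countP_cons, h2]
      by_cases hx : x ∈ ys <;> simp [hx]

theorem fA_eq_fB (a_jloc a_irow : List Int) : fA a_jloc a_irow = fB a_jloc a_irow := by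
  funext i k
  unfold fA fB
  rw [key_count]
  congr 1
  apply List.countP_congr
  intro q _
  simp [PySem.List.count_eq, List.count_eq_zero]

-- A's inner k-loop: the carried counter c is 0 at every loop entry, so it is
-- the plain filtered emission loop
theorem innerA (g : Int → Int) (l : List Int) : ∀ (bj bv : List Int),
    l.foldl (fun (s : Int × List Int × List Int) k =>
        if s.1 + g k ≠ 0 then ((0:Int), s.2.1 ++ [k], s.2.2 ++ [s.1 + g k]) else (s.1 + g k, s.2.1, s.2.2)) (0, bj, bv)
    = (0, l.foldl (fun (s : List Int × List Int) k =>
        if g k ≠ 0 then (s.1 ++ [k], s.2 ++ [g k]) else s) (bj, bv)) := by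
  induction l with
  | nil => intro bj bv; rfl
  | cons k l ih =>
      intro bj bv
      simp only [List.foldl_cons, zero_add]
      by_cases h : g k = 0
      · rw [if_neg (not_not_intro h), if_neg (not_not_intro h), h]
        exact ih _ _
      · rw [if_pos h, if_pos h]
        exact ih _ _

-- A's outer loop with the carried counter = the counter-free emission loop
theorem outerA (g : Int → Int → Int) (L : Int → List Int) (l : List Int) :
    ∀ (bj bi bv : List Int),
    l.foldl (fun (st : Int × List Int × List Int × List Int) i =>
        (((L i).foldl (fun (s : Int × List Int × List Int) k =>
            if s.1 + g i k ≠ 0 then ((0:Int), s.2.1 ++ [k], s.2.2 ++ [s.1 + g i k]) else (s.1 + g i k, s.2.1, s.2.2))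
          (st.1, st.2.1, st.2.2.2)).1,
         ((L i).foldl (fun (s : Int × List Int × List Int) k =>
            if s.1 + g i k ≠ 0 then ((0:Int), s.2.1 ++ [k], s.2.2 ++ [s.1 + g i k]) else (s.1 + g i k, s.2.1, s.2.2))
          (st.1, st.2.1, st.2.2.2)).2.1,
         st.2.2.1 ++ [((((L i).foldl (fun (s : Int × List Int × List Int) k =>
            if s.1 + g i k ≠ 0 then ((0:Int), s.2.1 ++ [k], s.2.2 ++ [s.1 + g i k]) else (s.1 + g i k, s.2.1, s.2.2))
          (st.1, st.2.1, st.2.2.2)).2.1.length : Int))],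
         ((L i).foldl (fun (s : Int × List Int × List Int) k =>
            if s.1 + g i k ≠ 0 then ((0:Int), s.2.1 ++ [k], s.2.2 ++ [s.1 + g i k]) else (s.1 + g i k, s.2.1, s.2.2))
          (st.1, st.2.1, st.2.2.2)).2.2)) ((0:Int), bj, bi, bv)
    = (0, l.foldl (fun (st : List Int × List Int × List Int) i =>
        (((L i).foldl (fun (s : List Int × List Int) k =>
            if g i k ≠ 0 then (s.1 ++ [k], s.2 ++ [g i k]) else s) (st.1, st.2.2)).1,
         st.2.1 ++ [((((L i).foldl (fun (s : List Int × List Int) k =>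
            if g i k ≠ 0 then (s.1 ++ [k], s.2 ++ [g i k]) else s) (st.1, st.2.2)).1.length : Int))],
         ((L i).foldl (fun (s : List Int × List Int) k =>
            if g i k ≠ 0 then (s.1 ++ [k], s.2 ++ [g i k]) else s) (st.1, st.2.2)).2)) (bj, bi, bv)) := by
  induction l with
  | nil => intro bj bi bv; rfl
  | cons i l ih =>
      intro bj bi bv
      simp only [List.foldl_cons]
      rw [innerA (g i) (L i) bj bv]
      exact ih _ _ _

theorem portA_eq_build (a_jloc a_irow : List Int) :
    create_ATA_array a_jloc a_irow = build (a_jloc.length : Int) (fA a_jloc a_irow) := by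
  have hn : ((a_jloc ++ [0]).length : Int) - 1 = (a_jloc.length : Int) := by simp
  simp only [create_ATA_array, PySem.List.foldl_ite_add_one, hn]
  rw [outerA]
  simp only [build, fA, colS]
  rfl

-- cast adapter for PySem.List.pyGetD_map_pyRange at an Int index
theorem pyGetD_map_pyRange' {β : Type} (f : Int → β) (n : Nat) (i : Int) (d : β)
    (h0 : 0 ≤ i) (h1 : i < (n : Int)) :
    PySem.List.pyGetD ((PySem.List.pyRange 0 (n : Int) 1).map f) i d = f i := by
  obtain ⟨k, rfl⟩ := Int.eq_ofNat_of_zero_le h0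
  exact PySem.List.pyGetD_map_pyRange f n k d (by exact_mod_cast h1)

theorem portB_eq_build (a_jloc a_irow : List Int) :
    create_ATA_array_alt a_jloc a_irow = build (a_jloc.length : Int) (fB a_jloc a_irow) := by
  have hn : ((a_jloc ++ [0]).length : Int) - 1 = (a_jloc.length : Int) := by simp
  simp only [create_ATA_array_alt, hn]
  have hsplit := PySem.List.foldl_prod_mk
    (fun (l : List (PySem.Dict Int Int)) j => l ++ [(PySem.List.slice a_irow (some (PySem.List.pyGetD (a_jloc ++ [0]) j 0)) (some (PySem.List.pyGetD (a_jloc ++ [0]) (j+1) 0))).foldl (fun d v => d.modify v 0 (· + 1)) (PySem.Dict.empty : PySem.Dict Int Int)])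
    (fun (l : List (List Int)) j => l ++ [((PySem.List.slice a_irow (some (PySem.List.pyGetD (a_jloc ++ [0]) j 0)) (some (PySem.List.pyGetD (a_jloc ++ [0]) (j+1) 0))).foldl (fun d v => d.modify v 0 (· + 1)) (PySem.Dict.empty : PySem.Dict Int Int)).keys])
    (PySem.List.pyRange 0 ((a_jloc.length : Nat) : Int) 1) [] []
  rw [hsplit]
  rw [PySem.List.foldl_append_singleton_eq_map, PySem.List.foldl_append_singleton_eq_map]
  simp only [List.nil_append, ← PySem.Dict.counter_eq_foldl]
  rw [PySem.List.foldl_congr_mem _ _ (fun (st : List Int × List Int × List Int) i =>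
        (((PySem.List.pyRange i ((a_jloc.length : Nat) : Int) 1).foldl (fun (s : List Int × List Int) k =>
            if fB a_jloc a_irow i k ≠ 0 then (s.1 ++ [k], s.2 ++ [fB a_jloc a_irow i k]) else s) (st.1, st.2.2)).1,
         st.2.1 ++ [((((PySem.List.pyRange i ((a_jloc.length : Nat) : Int) 1).foldl (fun (s : List Int × List Int) k =>
            if fB a_jloc a_irow i k ≠ 0 then (s.1 ++ [k], s.2 ++ [fB a_jloc a_irow i k]) else s) (st.1, st.2.2)).1.length : Int))],
         ((PySem.List.pyRange i ((a_jloc.length : Nat) : Int) 1).foldl (fun (s : List Int × List Int) k =>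
            if fB a_jloc a_irow i k ≠ 0 then (s.1 ++ [k], s.2 ++ [fB a_jloc a_irow i k]) else s) (st.1, st.2.2)).2)) _ ?_]
  · simp only [build, fB, colS]
  · intro acc i hi
    obtain ⟨h0, h1⟩ := PySem.List.mem_pyRange_one.mp hi
    have hci : PySem.List.pyGetD (List.map (fun j => PySem.Dict.counter
        (PySem.List.slice a_irow (some (PySem.List.pyGetD (a_jloc ++ [0]) j 0)) (some (PySem.List.pyGetD (a_jloc ++ [0]) (j+1) 0))))
        (PySem.List.pyRange 0 ((a_jloc.length : Nat) : Int) 1)) i PySem.Dict.empty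
        = PySem.Dict.counter (colS a_jloc a_irow i) :=
      pyGetD_map_pyRange' _ a_jloc.length i _ h0 h1
    rw [hci]
    have hfold : ∀ (p : List Int × List Int),
        (PySem.List.pyRange i ((a_jloc.length : Nat) : Int) 1).foldl (fun (s : List Int × List Int) k =>
          if ((PySem.List.pyGetD (List.map (fun j => (PySem.Dict.counter
              (PySem.List.slice a_irow (some (PySem.List.pyGetD (a_jloc ++ [0]) j 0)) (some (PySem.List.pyGetD (a_jloc ++ [0]) (j+1) 0)))).keys)
              (PySem.List.pyRange 0 ((a_jloc.length : Nat) : Int) 1)) k []).map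
              (fun v => (PySem.Dict.counter (colS a_jloc a_irow i)).getD v 0)).sum ≠ 0
          then (s.1 ++ [k], s.2 ++ [((PySem.List.pyGetD (List.map (fun j => (PySem.Dict.counter
              (PySem.List.slice a_irow (some (PySem.List.pyGetD (a_jloc ++ [0]) j 0)) (some (PySem.List.pyGetD (a_jloc ++ [0]) (j+1) 0)))).keys)
              (PySem.List.pyRange 0 ((a_jloc.length : Nat) : Int) 1)) k []).map
              (fun v => (PySem.Dict.counter (colS a_jloc a_irow i)).getD v 0)).sum])
          else s) p
        = (PySem.List.pyRange i ((a_jloc.length : Nat) : Int) 1).foldl (fun (s : List Int × List Int) k =>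
            if fB a_jloc a_irow i k ≠ 0 then (s.1 ++ [k], s.2 ++ [fB a_jloc a_irow i k]) else s) p := by
      intro p
      apply PySem.List.foldl_congr_mem
      intro s k hk
      obtain ⟨hk0, hk1⟩ := PySem.List.mem_pyRange_one.mp hk
      have hdk : PySem.List.pyGetD (List.map (fun j => (PySem.Dict.counter
          (PySem.List.slice a_irow (some (PySem.List.pyGetD (a_jloc ++ [0]) j 0)) (some (PySem.List.pyGetD (a_jloc ++ [0]) (j+1) 0)))).keys)
          (PySem.List.pyRange 0 ((a_jloc.length : Nat) : Int) 1)) k []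
          = (PySem.Dict.counter (colS a_jloc a_irow k)).keys :=
        pyGetD_map_pyRange' _ a_jloc.length k _ (le_trans h0 hk0) hk1
      rw [hdk, PySem.Dict.keys_counter]
      simp only [PySem.Dict.getD_counter, fB]
    rw [hfold]

-- ===== VERDICT (by name: the statement is the Claim_ definition above) =====
theorem create_ATA_array_spec : Claim_equal_create_ATA_array := by
  intro a_jloc a_irow _
  unfold Spec_create_ATA_array
  rw [portA_eq_build, portB_eq_build, fA_eq_fB]
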